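-- pv_equiv track=rewrite | github.com/Sergitxin22/Prog1 | 2. Exámenes segundo parcial/curso 2023-24/Examen Ana/solucion_examen_ana.py | repartos_por_repartidor
-- ===== SOURCE A (Python) =====
-- def repartos_por_repartidor(repartos):
--     contador_repartos_repartidor = {}
--
--     for reparto in repartos:
--         repartidor_actual = reparto['cod_repartidor']
--
--         if repartidor_actual in contador_repartos_repartidor:
--             contador_repartos_repartidor[repartidor_actual] += 1
--         else:
--             contador_repartos_repartidor[repartidor_actual] = 1
--
--     return contador_repartos_repartidor
-- ===== SOURCE B (Python) =====
-- def repartos_por_repartidor(repartos):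
--     cods = [r['cod_repartidor'] for r in repartos]
--     return {k: cods.count(k) for k in dict.fromkeys(cods)}
-- ===== Notes on version B (the rewrite author's own statement) =====
-- stated objective: simpler
-- what changed: Replaces the single-pass dict with membership-test-and-increment by extracting the code list, deduplicating it in first-occurrence order, and counting each distinct code with list.count.
-- outside the precondition, e.g. on repartos_por_repartidor([{}]): A raises KeyError, B raises KeyError
import Mathlib
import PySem

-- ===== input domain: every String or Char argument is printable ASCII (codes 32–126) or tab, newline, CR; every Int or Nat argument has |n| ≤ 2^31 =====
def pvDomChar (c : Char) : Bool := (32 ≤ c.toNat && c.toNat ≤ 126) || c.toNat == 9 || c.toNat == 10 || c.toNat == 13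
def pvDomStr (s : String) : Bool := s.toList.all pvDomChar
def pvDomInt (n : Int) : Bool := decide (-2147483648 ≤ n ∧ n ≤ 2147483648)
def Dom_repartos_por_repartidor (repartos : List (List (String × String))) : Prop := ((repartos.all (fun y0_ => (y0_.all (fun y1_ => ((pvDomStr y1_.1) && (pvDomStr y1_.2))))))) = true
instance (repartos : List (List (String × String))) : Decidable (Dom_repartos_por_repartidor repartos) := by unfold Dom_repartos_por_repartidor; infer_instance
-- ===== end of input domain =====

-- B builds the distinct-code list first (dict.fromkeys order) and counts each code with
-- list.count, instead of A's incremental membership-test-and-increment dict loop. Simpler.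

-- ===== PORT A =====
-- loop body: look up reparto['cod_repartidor'] (none = KeyError, excluded by Pre_),
-- then either increment the existing counter entry or insert 1.
def repartos_por_repartidor (repartos : List (List (String × String))) : List (String × Int) :=
  (repartos.foldl
    (fun d reparto =>
      match (PySem.Dict.mk reparto).get? "cod_repartidor" with
      | none => d   -- KeyError: unreachable under Pre_
      | some repartidor_actual =>
        if d.contains repartidor_actual then
          d.insert repartidor_actual (d.getD repartidor_actual 0 + 1)
        else
          d.insert repartidor_actual 1)
    (PySem.Dict.empty : PySem.Dict String Int)).items

-- ===== PORT B =====
-- cods = [r['cod_repartidor'] for r in repartos]; {k: cods.count(k) for k in dict.fromkeys(cods)}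
-- (the lookup's KeyError case is excluded by Pre_; getD "" stands in for it)
def repartos_por_repartidor_alt (repartos : List (List (String × String))) : List (String × Int) :=
  let cods := repartos.map (fun r => ((PySem.Dict.mk r).get? "cod_repartidor").getD "")
  (PySem.List.dedup cods).map (fun k => (k, (cods.count k : Int)))

-- ===== PRECONDITION & SPEC =====
-- Pre_ excludes exactly the inputs where some reparto lacks the key 'cod_repartidor',
-- on which both A and B raise KeyError.
def Pre_repartos_por_repartidor (repartos : List (List (String × String))) : Prop :=
  ∀ r ∈ repartos, "cod_repartidor" ∈ r.map Prod.fst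
instance (repartos : List (List (String × String))) : Decidable (Pre_repartos_por_repartidor repartos) := by unfold Pre_repartos_por_repartidor; infer_instance

def pvWitness_repartos_por_repartidor : (List (List (String × String))) :=
  ([[("cod_repartidor", "a")], [("cod_repartidor", "b"), ("zona", "1")], [("cod_repartidor", "a")]])

def Spec_repartos_por_repartidor (repartos : List (List (String × String))) (out : List (String × Int)) : Prop := out = repartos_por_repartidor_alt repartos
instance (repartos : List (List (String × String))) (out : List (String × Int)) : Decidable (Spec_repartos_por_repartidor repartos out) := by unfold Spec_repartos_por_repartidor; infer_instance

-- ===== CLAIM (what is proved, stated in full; the proofs are below) =====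
def Claim_equal_repartos_por_repartidor : Prop := ∀ (repartos : List (List (String × String))), Dom_repartos_por_repartidor repartos → Pre_repartos_por_repartidor repartos → Spec_repartos_por_repartidor repartos (repartos_por_repartidor repartos)

-- ===== LEMMAS AND PROOFS =====

-- Under Pre_, each row's lookup succeeds and A's fold is the standard counter fold over
-- the extracted code list.
theorem pv_foldA_eq_counter_fold (repartos : List (List (String × String)))
    (h : ∀ r ∈ repartos, "cod_repartidor" ∈ r.map Prod.fst)
    (d : PySem.Dict String Int) :
    repartos.foldl
      (fun d reparto =>
        match (PySem.Dict.mk reparto).get? "cod_repartidor" with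
        | none => d
        | some repartidor_actual =>
          if d.contains repartidor_actual then
            d.insert repartidor_actual (d.getD repartidor_actual 0 + 1)
          else
            d.insert repartidor_actual 1) d
    = (repartos.map (fun r => ((PySem.Dict.mk r).get? "cod_repartidor").getD "")).foldl
        (fun d x => d.insert x (d.getD x 0 + 1)) d := by
  induction repartos generalizing d with
  | nil => rfl
  | cons r rs ih =>
    have hr : "cod_repartidor" ∈ r.map Prod.fst := h r (List.mem_cons_self ..)
    obtain ⟨c, hc⟩ : ∃ c, (PySem.Dict.mk r).get? "cod_repartidor" = some c := by
      cases hg : (PySem.Dict.mk r).get? "cod_repartidor" with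
      | some c => exact ⟨c, rfl⟩
      | none =>
        rw [PySem.Dict.get?_eq_none_iff_not_mem_keys] at hg
        rw [PySem.Dict.keys_mk] at hg
        exact absurd hr hg
    simp only [List.foldl_cons, List.map_cons, hc, Option.getD_some]
    rw [ih (fun r2 hr2 => h r2 (List.mem_cons_of_mem _ hr2)) _]
    congr 1
    by_cases hcon : d.contains c
    · simp [hcon]
    · simp only [Bool.not_eq_true] at hcon
      simp [hcon, PySem.Dict.getD_of_not_contains d 0 hcon]

-- ===== VERDICT (by name: the statement is the Claim_ definition above) =====
theorem repartos_por_repartidor_spec : Claim_equal_repartos_por_repartidor := by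
  intro repartos _ hpre
  unfold Spec_repartos_por_repartidor repartos_por_repartidor repartos_por_repartidor_alt
  rw [pv_foldA_eq_counter_fold repartos hpre]
  rw [PySem.Dict.foldl_insert_getD_add_one_eq_counter, PySem.Dict.items_counter]
  simp [PySem.List.dedup_eq_ofList]
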